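-- pv_equiv track=rewrite | github.com/MateAlv/Sistemas-Distribuidos-TP-Grupo13 | scripts/generar-compose.py | _partition_ids
-- ===== SOURCE A (Python) =====
-- def _partition_ids(ids, shard_count):
--     if shard_count <= 0:
--         return []
--     if shard_count > len(ids):
--         raise ValueError(
--             f"No se pueden crear {shard_count} shards con solo {len(ids)} ids disponibles."
--         )
--
--     base = len(ids) // shard_count
--     remainder = len(ids) % shard_count
--
--     partitions = []
--     index = 0
--     for shard_index in range(shard_count):
--         size = base + (1 if shard_index < remainder else 0)
--         subset = ids[index : index + size]
--         index += size
--         if not subset: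
--             raise ValueError(
--                 f"Shard vacío generado al particionar ids {ids} en {shard_count} shards."
--             )
--         partitions.append(subset)
--     return partitions
-- ===== SOURCE B (Python) =====
-- def _partition_ids(ids, shard_count):
--     if shard_count <= 0:
--         return []
--     if shard_count > len(ids):
--         raise ValueError(
--             f"No se pueden crear {shard_count} shards con solo {len(ids)} ids disponibles."
--         )
--     base, remainder = divmod(len(ids), shard_count)
--     # Single pass over the ELEMENTS: element j belongs to shard bucket(j);
--     # the first `remainder` shards are the big ones of size base+1.
--     partitions = [[] for _ in range(shard_count)]
--     big = remainder * (base + 1)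
--     for j, x in enumerate(ids):
--         if j < big:
--             s = j // (base + 1)
--         else:
--             s = remainder + (j - big) // base
--         partitions[s].append(x)
--     return partitions
-- ===== Notes on version B (the rewrite author's own statement) =====
-- stated objective: alternative
-- what changed: Instead of looping over shards and slicing with a running index, B makes one pass over the elements, computing each element's shard number by a closed-form bucket formula and appending it into a pre-built list of empty buckets (no slicing, no per-shard sizes).
import Mathlib
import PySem

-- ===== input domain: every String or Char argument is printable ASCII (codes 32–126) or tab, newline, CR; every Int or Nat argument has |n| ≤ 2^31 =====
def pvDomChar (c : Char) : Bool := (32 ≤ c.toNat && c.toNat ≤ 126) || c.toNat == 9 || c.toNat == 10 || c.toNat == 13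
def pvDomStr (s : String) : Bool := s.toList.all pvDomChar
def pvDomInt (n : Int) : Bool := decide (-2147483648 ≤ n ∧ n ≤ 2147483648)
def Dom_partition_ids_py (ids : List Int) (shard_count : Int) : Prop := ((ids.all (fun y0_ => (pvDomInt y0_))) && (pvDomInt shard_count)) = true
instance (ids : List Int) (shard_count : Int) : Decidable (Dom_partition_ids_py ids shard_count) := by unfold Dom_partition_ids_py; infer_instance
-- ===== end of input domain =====

-- B replaces A's shard-by-shard slicing loop with one pass over the ELEMENTS, bucketing each
-- element into its shard by a closed-form index; equal return values on Pre_ (where neither raises).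

-- ===== PORT A =====
-- Loop over shards with a running `index` accumulator; the two `raise ValueError` branches are
-- outside Pre_ (the empty-subset raise is unreachable when shard_count ≤ len(ids)).
def partition_ids_py (ids : List Int) (shard_count : Int) : List (List Int) :=
  if shard_count ≤ 0 then []
  else if shard_count > (ids.length : Int) then []   -- Python raises ValueError here; outside Pre_
  else
    -- base := len(ids)//shard_count, remainder := len(ids)%shard_count (inlined)
    ((PySem.List.pyRange 0 shard_count 1).foldl
      (fun (st : List (List Int) × Int) shard_index =>
        let size : Int := PySem.Int.floordiv (ids.length : Int) shard_count +
          (if shard_index < PySem.Int.mod (ids.length : Int) shard_count then 1 else 0)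
        let subset := PySem.List.slice ids (some st.2) (some (st.2 + size))
        (st.1 ++ [subset], st.2 + size)) ([], 0)).1

-- ===== PORT B =====
-- element j (0-based) belongs to shard pvBucket base remainder j; `big` = remainder*(base+1) inlined
def pvBucket (base rem j : Int) : Int :=
  if j < rem * (base + 1) then PySem.Int.floordiv j (base + 1)
  else rem + PySem.Int.floordiv (j - rem * (base + 1)) base

def partition_ids_py_alt (ids : List Int) (shard_count : Int) : List (List Int) :=
  if shard_count ≤ 0 then []
  else if shard_count > (ids.length : Int) then []   -- Python raises ValueError here; outside Pre_
  else
    -- base, remainder = divmod(len(ids), shard_count) (inlined); partitions = [[] for _ in range(shard_count)]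
    (PySem.List.enumerate ids).foldl
      (fun st p =>
        st.modify (pvBucket (PySem.Int.floordiv (ids.length : Int) shard_count)
                            (PySem.Int.mod (ids.length : Int) shard_count) p.1).toNat
          (fun b => b ++ [p.2]))
      (List.replicate shard_count.toNat [])

-- ===== PRECONDITION & SPEC =====
-- Pre_ excludes exactly the inputs where A (and B alike) raises ValueError: 0 < shard_count > len(ids).
def Pre_partition_ids_py (ids : List Int) (shard_count : Int) : Prop :=
  shard_count ≤ 0 ∨ shard_count ≤ (ids.length : Int)
instance (ids : List Int) (shard_count : Int) : Decidable (Pre_partition_ids_py ids shard_count) := by unfold Pre_partition_ids_py; infer_instance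
def pvWitness_partition_ids_py : List Int × Int := ([1, 2, 3, 4, 5], 2)

def Spec_partition_ids_py (ids : List Int) (shard_count : Int) (out : List (List Int)) : Prop := out = partition_ids_py_alt ids shard_count
instance (ids : List Int) (shard_count : Int) (out : List (List Int)) : Decidable (Spec_partition_ids_py ids shard_count out) := by unfold Spec_partition_ids_py; infer_instance

-- ===== CLAIM (what is proved, stated in full; the proofs are below) =====
def Claim_equal_partition_ids_py : Prop := ∀ (ids : List Int) (shard_count : Int), Dom_partition_ids_py ids shard_count → Pre_partition_ids_py ids shard_count → Spec_partition_ids_py ids shard_count (partition_ids_py ids shard_count)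

-- ===== LEMMAS AND PROOFS =====

-- Closed-form shard boundaries (Int version, for A's loop; Nat version, for B's buckets).
def pvStart (base remainder i : Int) : Int := i * base + min i remainder
def pvNStart (base rem i : Nat) : Nat := i * base + min i rem
def pvBucketN (base rem j : Nat) : Nat :=
  if j < rem * (base + 1) then j / (base + 1) else rem + (j - rem * (base + 1)) / base

-- After processing the first m elements, bucket i holds this segment of ids.
def pvSeg (ids : List Int) (base rem i m : Nat) : List Int :=
  (ids.take (min (pvNStart base rem (i + 1)) m)).drop (pvNStart base rem i)

theorem pvBucket_natCast (base rem j : Nat) :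
    pvBucket (base : Int) (rem : Int) (j : Int) = ((pvBucketN base rem j : Nat) : Int) := by
  unfold pvBucket pvBucketN
  by_cases h : j < rem * (base + 1)
  · rw [if_pos (by exact_mod_cast h), if_pos h,
      show ((base : Int) + 1) = ((base + 1 : Nat) : Int) by push_cast; ring,
      PySem.Int.floordiv_natCast]
  · rw [if_neg (by exact_mod_cast h), if_neg h]
    have hle : rem * (base + 1) ≤ j := Nat.le_of_not_lt h
    rw [show (j : Int) - (rem : Int) * ((base : Int) + 1) = ((j - rem * (base + 1) : Nat) : Int) by
        rw [Nat.cast_sub hle]; push_cast; ring,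
      PySem.Int.floordiv_natCast]
    push_cast; ring

theorem pvNStart_mono (base rem : Nat) {i i' : Nat} (h : i ≤ i') :
    pvNStart base rem i ≤ pvNStart base rem i' := by
  unfold pvNStart
  have := Nat.mul_le_mul_right base h
  have := min_le_min_right rem h
  omega

-- The bucket of element j lies in range, and j lies between its bucket's boundaries.
theorem pvBucketN_spec (k base rem j : Nat) (hb : 1 ≤ base) (hrem : rem < k)
    (hj : j < base * k + rem) :
    pvBucketN base rem j < k ∧ pvNStart base rem (pvBucketN base rem j) ≤ j ∧
      j < pvNStart base rem (pvBucketN base rem j + 1) := by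
  unfold pvBucketN pvNStart
  by_cases h : j < rem * (base + 1)
  · rw [if_pos h]
    set s := j / (base + 1) with hs
    have hslt : s < rem := (Nat.div_lt_iff_lt_mul (by omega)).2 h
    obtain ⟨r, hrlt, hjr⟩ : ∃ r, r < base + 1 ∧ j = s * (base + 1) + r :=
      ⟨j % (base + 1), Nat.mod_lt _ (by omega),
        by rw [hs, Nat.mul_comm]; exact (Nat.div_add_mod j (base + 1)).symm⟩
    have e1 : s * (base + 1) = s * base + s := by ring
    have e3 : (s + 1) * base + (s + 1) = s * (base + 1) + (base + 1) := by ring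
    rw [min_eq_left (by omega), min_eq_left (by omega)]
    refine ⟨by omega, by omega, by omega⟩
  · rw [if_neg h]
    have hle : rem * (base + 1) ≤ j := Nat.le_of_not_lt h
    set t := j - rem * (base + 1) with ht
    set q := t / base with hq
    have e0 : rem * (base + 1) = rem * base + rem := by ring
    have e1 : (k - rem) * base + rem * base = base * k := by
      rw [← Nat.add_mul, Nat.sub_add_cancel (le_of_lt hrem)]; ring
    have hqlt : q < k - rem := by
      refine (Nat.div_lt_iff_lt_mul (by omega)).2 ?_
      omega
    obtain ⟨r, hrlt, htr⟩ : ∃ r, r < base ∧ t = q * base + r :=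
      ⟨t % base, Nat.mod_lt _ (by omega),
        by rw [hq, Nat.mul_comm]; exact (Nat.div_add_mod t base).symm⟩
    rw [min_eq_right (Nat.le_add_right rem q),
      min_eq_right (Nat.le_succ_of_le (Nat.le_add_right rem q))]
    have e3 : (rem + q) * base = rem * base + q * base := by ring
    have e4 : (rem + q + 1) * base = rem * base + q * base + base := by ring
    refine ⟨by omega, by omega, by omega⟩

-- Loop invariant for B: folding the first m enumerated elements fills bucket i with pvSeg i m.
theorem pvFoldB (ids : List Int) (k base rem : Nat) (hb : 1 ≤ base) (hrem : rem < k)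
    (hn : ids.length = base * k + rem) :
    ∀ m, m ≤ ids.length →
    (PySem.List.enumerate (ids.take m)).foldl
      (fun st p => st.modify (pvBucket (base : Int) (rem : Int) p.1).toNat (fun b => b ++ [p.2]))
      (List.replicate k []) =
    (List.range k).map (fun i => pvSeg ids base rem i m) := by
  intro m
  induction m with
  | zero =>
      intro _
      simp [PySem.List.enumerate_nil, pvSeg]
  | succ m ih =>
      intro hm
      have hmlt : m < ids.length := by omega
      rw [List.take_succ_eq_append_getElem hmlt, PySem.List.enumerate_append,
        List.foldl_append, ih (by omega)]
      have hlen : (ids.take m).length = m := List.length_take_of_le (by omega)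
      simp only [PySem.List.enumerate_cons, PySem.List.enumerate_nil, hlen,
        List.foldl_cons, List.foldl_nil]
      rw [show ((0 : Int) + (m : Int)) = ((m : Nat) : Int) by ring,
        pvBucket_natCast, Int.toNat_natCast]
      obtain ⟨hsk, hs1, hs2⟩ := pvBucketN_spec k base rem m hb hrem (by omega)
      set s := pvBucketN base rem m with hsdef
      apply List.ext_getElem
      · simp [List.length_modify]
      · intro j hj1 hj2
        rw [List.getElem_modify]
        simp only [List.getElem_map, List.getElem_range] at *
        have hjk : j < k := by simpa [List.length_modify] using hj1
        by_cases hjs : s = j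
        · subst hjs
          rw [if_pos rfl]
          unfold pvSeg
          rw [min_eq_right (by omega), min_eq_right (by omega),
            List.take_succ_eq_append_getElem hmlt,
            List.drop_append_of_le_length (by rw [hlen]; exact hs1)]
        · rw [if_neg hjs]
          unfold pvSeg
          rcases Nat.lt_or_ge j s with hlt | hge
          · -- j < s : segment already complete, boundaries below m
            have : pvNStart base rem (j + 1) ≤ pvNStart base rem s := pvNStart_mono base rem hlt
            rw [min_eq_left (by omega), min_eq_left (by omega)]
          · -- j > s : segment still empty, boundaries above m
            have hjs' : s + 1 ≤ j := by omega
            have hge' : pvNStart base rem (s + 1) ≤ pvNStart base rem j := pvNStart_mono base rem hjs'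
            have h1 : (ids.take (min (pvNStart base rem (j + 1)) (m + 1))).length ≤ pvNStart base rem j := by
              rw [List.length_take]; omega
            have h2 : (ids.take (min (pvNStart base rem (j + 1)) m)).length ≤ pvNStart base rem j := by
              rw [List.length_take]; omega
            rw [List.drop_eq_nil_of_le h1, List.drop_eq_nil_of_le h2]

-- One fold step of A advances the running index from boundary i to boundary (i+1).
theorem pvStart_step (base remainder : Int) (i : Int) :
    pvStart base remainder i + (base + (if i < remainder then 1 else 0)) =
      pvStart base remainder (i + 1) := by
  unfold pvStart
  rcases lt_or_ge i remainder with h | h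
  · rw [if_pos h, min_eq_left (by omega), min_eq_left (by omega)]; ring
  · rw [if_neg (by omega), min_eq_right (by omega), min_eq_right (by omega)]; ring

-- Loop invariant for A: after range(0, m) the fold state is (map of closed-form slices, boundary m).
theorem pvFold_invariant (ids : List Int) (base remainder : Int) (hr : 0 ≤ remainder) (m : Nat) :
    (PySem.List.pyRange 0 (m : Int) 1).foldl
      (fun (st : List (List Int) × Int) shard_index =>
        let size : Int := base + (if shard_index < remainder then 1 else 0)
        let subset := PySem.List.slice ids (some st.2) (some (st.2 + size))
        (st.1 ++ [subset], st.2 + size)) ([], 0)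
    = ((PySem.List.pyRange 0 (m : Int) 1).map
        (fun i => PySem.List.slice ids (some (pvStart base remainder i))
                                       (some (pvStart base remainder (i + 1)))),
       pvStart base remainder m) := by
  induction m with
  | zero =>
      simp [PySem.List.pyRange_one_eq_nil (by omega : (0:Int) ≤ 0), pvStart,
        min_eq_left hr]
  | succ m ih =>
      rw [show ((m + 1 : Nat) : Int) = (m : Int) + 1 by push_cast; ring,
        PySem.List.pyRange_one_succ_right (by positivity),
        List.foldl_append, ih, List.map_append]
      simp only [List.foldl_cons, List.foldl_nil, List.map_cons, List.map_nil]
      rw [pvStart_step base remainder (m : Int)]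

theorem pvStart_natCast (base rem i : Nat) :
    pvStart (base : Int) (rem : Int) (i : Int) = ((pvNStart base rem i : Nat) : Int) := by
  unfold pvStart pvNStart
  push_cast [Nat.cast_min]
  ring

-- ===== VERDICT (by name: the statement is the Claim_ definition above) =====
theorem partition_ids_py_spec : Claim_equal_partition_ids_py := by
  intro ids shard_count _ hpre
  unfold Spec_partition_ids_py partition_ids_py partition_ids_py_alt
  by_cases h0 : shard_count ≤ 0
  · simp [h0]
  · rw [if_neg h0, if_neg h0]
    have hle : shard_count ≤ (ids.length : Int) := by
      rcases hpre with h | h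
      · omega
      · exact h
    rw [if_neg (by omega), if_neg (by omega)]
    set k := shard_count.toNat with hkdef
    have hk : ((k : Nat) : Int) = shard_count := Int.toNat_of_nonneg (by omega)
    set n := ids.length with hndef
    have hkn : k ≤ n := by omega
    have hkpos : 0 < k := by omega
    set base := n / k with hbase
    set rem := n % k with hrem
    have hb1 : 1 ≤ base := (Nat.one_le_div_iff hkpos).2 hkn
    have hremk : rem < k := Nat.mod_lt n hkpos
    have hnk : n = base * k + rem := by
      rw [hbase, hrem]; exact (Nat.div_add_mod' n k).symm
    have hfd : PySem.Int.floordiv (n : Int) ((k : Nat) : Int) = ((base : Nat) : Int) :=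
      PySem.Int.floordiv_natCast n k
    have hmd : PySem.Int.mod (n : Int) ((k : Nat) : Int) = ((rem : Nat) : Int) :=
      PySem.Int.mod_natCast n k
    -- A's side: closed-form slices
    rw [← hk]
    rw [hfd, hmd]
    rw [pvFold_invariant ids (base : Int) (rem : Int) (by positivity) k]
    -- B's side: bucket fold
    rw [show PySem.List.enumerate ids = PySem.List.enumerate (ids.take n) by rw [hndef]; simp,
      pvFoldB ids k base rem hb1 hremk hnk n (le_refl _)]
    -- both are maps over the k shard indices
    rw [PySem.List.pyRange_one, List.map_map]
    simp only [sub_zero, Int.toNat_natCast]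
    apply List.map_congr_left
    intro i hi
    have hik : i < k := List.mem_range.1 hi
    simp only [Function.comp_apply, zero_add]
    rw [show ((i : Nat) : Int) + 1 = (((i + 1 : Nat)) : Int) by push_cast; ring]
    rw [pvStart_natCast, pvStart_natCast, PySem.List.slice_natCast]
    unfold pvSeg
    have hup : pvNStart base rem (i + 1) ≤ n := by
      have h1 : pvNStart base rem (i + 1) ≤ pvNStart base rem k := pvNStart_mono base rem (by omega)
      have h2 : pvNStart base rem k = n := by
        unfold pvNStart
        rw [min_eq_right (by omega), Nat.mul_comm]
        omega
      omega
    rw [min_eq_left hup, List.drop_take]
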